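-- pv_equiv track=rewrite | github.com/HobbitDur/FF8UltimateEditor | Ifrit/IfritAI/codepreprocessing.py | _find_else_block_boundaries
-- ===== SOURCE A (Python) =====
-- def _find_else_block_boundaries(code_text, else_start):
--     """
--     Find the start and end of an else block
--     """
--     # Find the opening brace after else
--     brace_start = code_text.find("{", else_start)
--     if brace_start == -1:
--         return -1, -1
--
--     # Count braces to find matching closing brace
--     depth = 1
--     current_pos = brace_start + 1
--
--     while current_pos < len(code_text) and depth > 0:
--         if code_text[current_pos] == '{':
--             depth += 1
--         elif code_text[current_pos] == '}':
--             depth -= 1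
--             if depth == 0:
--                 break
--
--         current_pos += 1
--
--     if depth == 0:
--         else_end = current_pos + 1
--         return else_start, else_end
--     else:
--         return -1, -1
-- ===== SOURCE B (Python) =====
-- def _closing(code_text, pos):
--     """Index of the '}' closing the block whose body starts at pos, or -1.
--     Recursive descent: each nested '{' is matched by a recursive call and skipped."""
--     while pos < len(code_text):
--         c = code_text[pos]
--         if c == '}':
--             return pos
--         if c == '{':
--             inner = _closing(code_text, pos + 1)
--             if inner == -1:
--                 return -1
--             pos = inner + 1
--         else:
--             pos += 1
--     return -1
--
--
-- def _find_else_block_boundaries(code_text, else_start):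
--     """
--     Find the start and end of an else block
--     """
--     brace_start = code_text.find("{", else_start)
--     if brace_start == -1:
--         return -1, -1
--     end = _closing(code_text, brace_start + 1)
--     if end == -1:
--         return -1, -1
--     return else_start, end + 1
-- ===== Notes on version B (the rewrite author's own statement) =====
-- stated objective: alternative
-- what changed: B replaces A's depth-counter scan with a recursive-descent matcher: a helper walks the block body and matches each nested '{' by a recursive call, resuming after the returned inner closing brace, so no depth counter is maintained.
import Mathlib
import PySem

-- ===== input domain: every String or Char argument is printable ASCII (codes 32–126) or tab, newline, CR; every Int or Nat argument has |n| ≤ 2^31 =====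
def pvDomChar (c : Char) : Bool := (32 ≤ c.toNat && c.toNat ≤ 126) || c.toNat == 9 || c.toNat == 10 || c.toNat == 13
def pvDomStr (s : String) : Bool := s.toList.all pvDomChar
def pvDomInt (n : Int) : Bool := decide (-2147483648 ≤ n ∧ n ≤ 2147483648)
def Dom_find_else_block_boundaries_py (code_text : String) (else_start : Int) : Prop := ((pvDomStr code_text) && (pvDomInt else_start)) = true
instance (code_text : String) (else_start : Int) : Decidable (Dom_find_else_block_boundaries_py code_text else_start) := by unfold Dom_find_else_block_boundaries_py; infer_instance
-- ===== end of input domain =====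

-- B replaces A's depth-counter scan with a recursive-descent matcher (a nested '{' is matched
-- by a recursive call and skipped); same result, same O(n) cost (objective: alternative).

-- ===== PORT A =====
-- A's while loop: returns the state (current_pos, depth) at loop exit (break returns depth 0)
def pvLoopA (cs : List Char) (pos : Nat) (depth : Int) : Nat × Int :=
  if h : pos < cs.length ∧ 0 < depth then
    if cs[pos]'h.1 = '{' then pvLoopA cs (pos + 1) (depth + 1)
    else if cs[pos]'h.1 = '}' then
      if depth - 1 = 0 then (pos, depth - 1)   -- break
      else pvLoopA cs (pos + 1) (depth - 1)
    else pvLoopA cs (pos + 1) depth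
  else (pos, depth)
termination_by cs.length - pos

def find_else_block_boundaries_py (code_text : String) (else_start : Int) : Int × Int :=
  let brace_start := PySem.Str.findFrom code_text "{" else_start
  if brace_start = -1 then (-1, -1)
  else
    let r := pvLoopA code_text.toList (brace_start.toNat + 1) 1
    if r.2 = 0 then (else_start, (r.1 : Int) + 1) else (-1, -1)

-- ===== PORT B =====
-- B's _closing: recursive descent; fuel is a termination guard only (pos strictly increases
-- along every chain of calls, so fuel = length + 1 is never exhausted at the top-level call)
def pvClosing : Nat → List Char → Nat → Option Nat
  | 0, _, _ => none
  | fuel + 1, cs, pos =>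
    if h : pos < cs.length then
      if cs[pos]'h = '}' then some pos
      else if cs[pos]'h = '{' then
        match pvClosing fuel cs (pos + 1) with
        | none => none
        | some inner => pvClosing fuel cs (inner + 1)
      else pvClosing fuel cs (pos + 1)
    else none

def find_else_block_boundaries_py_alt (code_text : String) (else_start : Int) : Int × Int :=
  let brace_start := PySem.Str.findFrom code_text "{" else_start
  if brace_start = -1 then (-1, -1)
  else
    match pvClosing (code_text.toList.length + 1) code_text.toList (brace_start.toNat + 1) with
    | some i => (else_start, (i : Int) + 1)
    | none => (-1, -1)

-- ===== PRECONDITION & SPEC =====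
def Spec_find_else_block_boundaries_py (code_text : String) (else_start : Int) (out : Int × Int) : Prop := out = find_else_block_boundaries_py_alt code_text else_start
instance (code_text : String) (else_start : Int) (out : Int × Int) : Decidable (Spec_find_else_block_boundaries_py code_text else_start out) := by unfold Spec_find_else_block_boundaries_py; infer_instance

-- ===== CLAIM =====
def Claim_equal_find_else_block_boundaries_py : Prop := ∀ (code_text : String) (else_start : Int), Dom_find_else_block_boundaries_py code_text else_start → Spec_find_else_block_boundaries_py code_text else_start (find_else_block_boundaries_py code_text else_start)

-- ===== LEMMAS AND PROOFS =====

-- the recursive matcher never returns an index left of its starting position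
theorem pvClosing_ge (cs : List Char) :
    ∀ (fuel pos i : Nat), pvClosing fuel cs pos = some i → pos ≤ i := by
  intro fuel
  induction fuel with
  | zero => intro pos i h; simp [pvClosing] at h
  | succ n ih =>
    intro pos i h
    rw [pvClosing] at h
    split_ifs at h with h1 h2 h3
    · exact le_of_eq (Option.some.inj h)
    · cases hin : pvClosing n cs (pos + 1) with
      | none => rw [hin] at h; simp at h
      | some inner =>
        rw [hin] at h
        have h1' := ih (pos + 1) inner hin
        have h2' := ih (inner + 1) i h
        omega
    · have := ih (pos + 1) i h; omega

-- B's recursive matcher computes where A's depth-counter scan ends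
theorem pv_main (cs : List Char) :
    ∀ (fuel pos : Nat) (d : Int), cs.length - pos < fuel → 1 ≤ d →
    (∀ i, pvClosing fuel cs pos = some i →
      pvLoopA cs pos d = if d = 1 then ((i : Nat), (0 : Int)) else pvLoopA cs (i + 1) (d - 1)) ∧
    (pvClosing fuel cs pos = none → (pvLoopA cs pos d).2 ≠ 0) := by
  intro fuel
  induction fuel with
  | zero => intro pos d hf hd; omega
  | succ n ih =>
    intro pos d hf hd
    by_cases hp : pos < cs.length
    · by_cases hc : cs[pos]'hp = '}'
      · constructor
        · intro i hi
          rw [pvClosing, dif_pos hp, if_pos hc] at hi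
          cases hi
          rw [pvLoopA, dif_pos ⟨hp, by omega⟩]
          have hne : cs[pos]'hp ≠ '{' := by rw [hc]; decide
          rw [if_neg hne, if_pos hc]
          by_cases hd1 : d = 1
          · rw [if_pos (by omega), if_pos hd1]; simp [hd1]
          · rw [if_neg (by omega), if_neg hd1]
        · intro hn
          rw [pvClosing, dif_pos hp, if_pos hc] at hn
          simp at hn
      · by_cases ho : cs[pos]'hp = '{'
        · have huA : pvLoopA cs pos d = pvLoopA cs (pos + 1) (d + 1) := by
            rw [pvLoopA, dif_pos ⟨hp, by omega⟩, if_pos ho]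
          have ihin := ih (pos + 1) (d + 1) (by omega) (by omega)
          constructor
          · intro i hi
            rw [pvClosing, dif_pos hp, if_neg hc, if_pos ho] at hi
            cases hin : pvClosing n cs (pos + 1) with
            | none => rw [hin] at hi; simp at hi
            | some inner =>
              rw [hin] at hi
              have h1 := ihin.1 inner hin
              rw [if_neg (by omega)] at h1
              have hge := pvClosing_ge cs n (pos + 1) inner hin
              have ihi2 := ih (inner + 1) d (by omega) hd
              have h2 := ihi2.1 i hi
              rw [huA, h1]
              simpa using h2
          · intro hn
            rw [pvClosing, dif_pos hp, if_neg hc, if_pos ho] at hn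
            cases hin : pvClosing n cs (pos + 1) with
            | none =>
              have := ihin.2 hin
              rw [huA]; exact this
            | some inner =>
              rw [hin] at hn
              have h1 := ihin.1 inner hin
              rw [if_neg (by omega)] at h1
              have hge := pvClosing_ge cs n (pos + 1) inner hin
              have ihi2 := ih (inner + 1) d (by omega) hd
              have h2 := ihi2.2 hn
              rw [huA, h1]
              simpa using h2
        · have huA : pvLoopA cs pos d = pvLoopA cs (pos + 1) d := by
            rw [pvLoopA, dif_pos ⟨hp, by omega⟩, if_neg ho, if_neg hc]
          have ihin := ih (pos + 1) d (by omega) hd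
          constructor
          · intro i hi
            rw [pvClosing, dif_pos hp, if_neg hc, if_neg ho] at hi
            rw [huA]; exact ihin.1 i hi
          · intro hn
            rw [pvClosing, dif_pos hp, if_neg hc, if_neg ho] at hn
            rw [huA]; exact ihin.2 hn
    · constructor
      · intro i hi
        rw [pvClosing, dif_neg hp] at hi
        simp at hi
      · intro _
        rw [pvLoopA, dif_neg (by omega)]
        simp; omega

-- ===== VERDICT =====
theorem find_else_block_boundaries_py_spec : Claim_equal_find_else_block_boundaries_py := by
  intro code_text else_start _
  unfold Spec_find_else_block_boundaries_py
  unfold find_else_block_boundaries_py find_else_block_boundaries_py_alt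
  by_cases hbs : PySem.Str.findFrom code_text "{" else_start = -1
  · rw [if_pos hbs, if_pos hbs]
  · rw [if_neg hbs, if_neg hbs]
    set bs := PySem.Str.findFrom code_text "{" else_start with hbsdef
    set cs := code_text.toList with hcsdef
    have hmain := pv_main cs (cs.length + 1) (bs.toNat + 1) 1 (by omega) (by omega)
    cases hcl : pvClosing (cs.length + 1) cs (bs.toNat + 1) with
    | none =>
      have := hmain.2 hcl
      rw [if_neg this]
    | some i =>
      have h1 := hmain.1 i hcl
      rw [if_pos rfl] at h1
      rw [h1]
      simp
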